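-- pv_equiv track=rewrite | github.com/k9want/python-Algorithm | 구현/n^2배열자르기.py | solution
-- ===== SOURCE A (Python) =====
-- def solution(n, left, right):
--     answer = []
--
--     for i in range(left, right + 1):
--         a = i // n
--         b = i % n
--         result = max(a, b)
--         answer.append(result + 1)
--
--     return answer
-- ===== SOURCE B (Python) =====
-- def solution(n, left, right):
--     answer = []
--     for a in range(left // n, right // n + 1):
--         row = a * n
--         for b in range(max(left, row) - row, min(right, row + n - 1) - row + 1):
--             answer.append(max(a, b) + 1)
--     return answer
-- ===== Notes on version B (the rewrite author's own statement) =====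
-- stated objective: alternative
-- what changed: B traverses the n x n grid row by row with an explicit outer row loop and an inner column loop clipped to [left, right], instead of A's single flat loop doing a divmod per index.
-- outside the precondition, e.g. on solution(-2, 0, 2): A returns [1, 0, 1], B returns []; on solution(0, 0, 1): A raises ZeroDivisionError, B raises ZeroDivisionError
import Mathlib
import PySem

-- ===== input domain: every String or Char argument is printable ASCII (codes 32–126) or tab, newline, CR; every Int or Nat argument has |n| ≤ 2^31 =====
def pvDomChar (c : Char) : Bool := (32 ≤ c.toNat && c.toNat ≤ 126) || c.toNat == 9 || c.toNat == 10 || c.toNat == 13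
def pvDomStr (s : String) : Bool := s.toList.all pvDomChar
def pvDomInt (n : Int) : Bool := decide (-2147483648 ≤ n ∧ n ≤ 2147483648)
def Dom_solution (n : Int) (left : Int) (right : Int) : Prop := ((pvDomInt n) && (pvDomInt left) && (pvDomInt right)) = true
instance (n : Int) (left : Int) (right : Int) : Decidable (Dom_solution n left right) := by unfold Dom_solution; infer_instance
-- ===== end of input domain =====

-- B replaces A's flat divmod loop by an explicit row-then-column traversal of the n×n grid
-- (a different decomposition of the same O(right-left) work; no speed claim).

-- ===== PORT A =====
def solution (n : Int) (left : Int) (right : Int) : List Int :=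
  (PySem.List.pyRange left (right + 1) 1).foldl
    (fun answer i =>
      let a := PySem.Int.floordiv i n
      let b := PySem.Int.mod i n
      let result := max a b
      answer ++ [result + 1]) []

-- ===== PORT B =====
def solution_alt (n : Int) (left : Int) (right : Int) : List Int :=
  (PySem.List.pyRange (PySem.Int.floordiv left n) (PySem.Int.floordiv right n + 1) 1).foldl
    (fun answer a =>
      let row := a * n
      (PySem.List.pyRange (max left row - row) (min right (row + n - 1) - row + 1) 1).foldl
        (fun ans b => ans ++ [max a b + 1]) answer) []

-- ===== PRECONDITION & SPEC =====
-- Pre_ restricts to the task's natural domain of positive grid sizes n ≥ 1: A raises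
-- ZeroDivisionError for n = 0, and for negative n A's values are floor-division artefacts
-- with no n×n-grid meaning (B's row loop naturally returns [] there); left and right are
-- unrestricted.
def Pre_solution (n : Int) (left : Int) (right : Int) : Prop := 1 ≤ n
instance (n : Int) (left : Int) (right : Int) : Decidable (Pre_solution n left right) := by unfold Pre_solution; infer_instance
def pvWitness_solution : Int × Int × Int := (3, 2, 5)
def Spec_solution (n : Int) (left : Int) (right : Int) (out : List Int) : Prop := out = solution_alt n left right
instance (n : Int) (left : Int) (right : Int) (out : List Int) : Decidable (Spec_solution n left right out) := by unfold Spec_solution; infer_instance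

-- ===== CLAIM (what is proved, stated in full; the proofs are below) =====
def Claim_equal_solution : Prop := ∀ (n : Int) (left : Int) (right : Int), Dom_solution n left right → Pre_solution n left right → Spec_solution n left right (solution n left right)

-- ===== LEMMAS AND PROOFS =====

-- the per-cell value A computes at flat index i
def pvCell (n i : Int) : Int := max (PySem.Int.floordiv i n) (PySem.Int.mod i n) + 1

-- the column list B produces for row a
def pvRow (n left right a : Int) : List Int :=
  (PySem.List.pyRange (max left (a * n) - a * n) (min right (a * n + n - 1) - a * n + 1) 1).map
    (fun b => max a b + 1)

theorem fdiv_bounds (n i : Int) (hn : 1 ≤ n) :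
    (PySem.Int.floordiv i n) * n ≤ i ∧ i < (PySem.Int.floordiv i n) * n + n := by
  have h := (PySem.Int.floordiv_eq_iff_of_pos (a := i) (b := n) (by omega)).mp rfl
  exact ⟨h.1, by nlinarith [h.2]⟩

theorem fdiv_eq (n i q : Int) (hn : 1 ≤ n) (h1 : q * n ≤ i) (h2 : i < q * n + n) :
    PySem.Int.floordiv i n = q :=
  (PySem.Int.floordiv_eq_iff_of_pos (by omega)).mpr ⟨h1, by nlinarith⟩

theorem mod_eq (n i : Int) (hn : 1 ≤ n) :
    PySem.Int.mod i n = i - (PySem.Int.floordiv i n) * n := by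
  have h := PySem.Int.floordiv_mul_add_mod i n
  omega

theorem fdiv_mono (n i j : Int) (hn : 1 ≤ n) (h : i ≤ j) :
    PySem.Int.floordiv i n ≤ PySem.Int.floordiv j n := by
  by_contra hc
  have hi := fdiv_bounds n i hn
  have hj := fdiv_bounds n j hn
  nlinarith [hi.1, hj.2]

theorem flatten_map_singleton (f : Int → Int) (l : List Int) :
    (l.map (fun x => [f x])).flatten = l.map f := by
  induction l with
  | nil => rfl
  | cons x xs ih => simp [ih]

theorem solution_eq_map (n left right : Int) :
    solution n left right = (PySem.List.pyRange left (right + 1) 1).map (pvCell n) := by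
  simp [solution]
  exact flatten_map_singleton (pvCell n) _

theorem outer_foldl (n left right : Int) (rows : List Int) (acc : List Int) :
    rows.foldl (fun answer a =>
      (PySem.List.pyRange (max left (a * n) - a * n) (min right (a * n + n - 1) - a * n + 1) 1).foldl
        (fun ans b => ans ++ [max a b + 1]) answer) acc
    = acc ++ rows.flatMap (pvRow n left right) := by
  induction rows generalizing acc with
  | nil => simp
  | cons a as ih =>
    rw [List.foldl_cons, PySem.List.foldl_append_singleton_eq_map, ih, List.flatMap_cons]
    simp only [pvRow]
    rw [List.append_assoc]

theorem solution_alt_eq_flatMap (n left right : Int) :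
    solution_alt n left right =
      (PySem.List.pyRange (PySem.Int.floordiv left n) (PySem.Int.floordiv right n + 1) 1).flatMap
        (pvRow n left right) := by
  have h := outer_foldl n left right
    (PySem.List.pyRange (PySem.Int.floordiv left n) (PySem.Int.floordiv right n + 1) 1) []
  rw [List.nil_append] at h
  exact h

theorem shift_map (f : Int → Int) (lo hi c : Int) :
    (PySem.List.pyRange (lo + c) (hi + c) 1).map f
      = (PySem.List.pyRange lo hi 1).map (fun x => f (x + c)) := by
  rw [PySem.List.pyRange_one, PySem.List.pyRange_one]
  simp only [List.map_map]
  have : hi + c - (lo + c) = hi - lo := by ring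
  rw [this]
  exact List.map_congr_left (fun k _ => by simp only [Function.comp]; ring_nf)

-- the first (possibly partial) row of B equals A's values over that stretch of flat indices
theorem row_head (n l r : Int) (hn : 1 ≤ n) (hla : PySem.Int.floordiv l n * n ≤ l) :
    pvRow n l r (PySem.Int.floordiv l n)
      = (PySem.List.pyRange l (min r (PySem.Int.floordiv l n * n + n - 1) + 1) 1).map (pvCell n) := by
  set la := PySem.Int.floordiv l n with hladef
  set row := la * n with hrow
  have hmaxl : max l row = l := by omega
  have h1 : l - row + row = l := by ring
  have h2 : min r (row + n - 1) - row + 1 + row = min r (row + n - 1) + 1 := by ring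
  unfold pvRow
  rw [← hrow, hmaxl]
  have hs := shift_map (fun i => max la (i - row) + 1) (l - row) (min r (row + n - 1) - row + 1) row
  rw [h1, h2] at hs
  have heq : (fun b => max la b + 1) = (fun b => (fun i => max la (i - row) + 1) (b + row)) := by
    funext b; simp
  rw [heq, ← hs]
  apply List.map_congr_left
  intro i hi
  rw [PySem.List.mem_pyRange_one] at hi
  have hfi : PySem.Int.floordiv i n = la := by
    apply fdiv_eq n i la hn (by omega) (by omega)
  unfold pvCell
  rw [hfi, mod_eq n i hn, hfi]

-- main range decomposition: the flat indexed map equals B's row-by-row flatMap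
theorem main_aux : ∀ (k : Nat) (n l r : Int), 1 ≤ n → (r + 1 - l).toNat ≤ k →
    (PySem.List.pyRange l (r + 1) 1).map (pvCell n) =
      (PySem.List.pyRange (PySem.Int.floordiv l n) (PySem.Int.floordiv r n + 1) 1).flatMap
        (pvRow n l r) := by
  intro k
  induction k with
  | zero =>
    intro n l r hn hk
    have hrl : r < l := by omega
    rw [PySem.List.pyRange_one_eq_nil (by omega)]
    have hle := fdiv_mono n r l hn (by omega)
    rcases lt_or_eq_of_le hle with hlt | heq
    · rw [PySem.List.pyRange_one_eq_nil (by omega)]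
      simp
    · rw [heq, PySem.List.pyRange_one_succ_right (le_refl _),
        PySem.List.pyRange_one_eq_nil (le_refl _)]
      simp only [List.nil_append, List.flatMap_cons, List.flatMap_nil, List.append_nil,
        List.map_nil]
      unfold pvRow
      rw [PySem.List.pyRange_one_eq_nil (by omega)]
      simp
  | succ k ih =>
    intro n l r hn hk
    by_cases hrl : r < l
    · rw [PySem.List.pyRange_one_eq_nil (by omega)]
      have hle := fdiv_mono n r l hn (by omega)
      rcases lt_or_eq_of_le hle with hlt | heq
      · rw [PySem.List.pyRange_one_eq_nil (by omega)]
        simp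
      · rw [heq, PySem.List.pyRange_one_succ_right (le_refl _),
          PySem.List.pyRange_one_eq_nil (le_refl _)]
        simp only [List.nil_append, List.flatMap_cons, List.flatMap_nil, List.append_nil,
          List.map_nil]
        unfold pvRow
        rw [PySem.List.pyRange_one_eq_nil (by omega)]
        simp
    · rw [not_lt] at hrl   -- l ≤ r
      set la := PySem.Int.floordiv l n with hladef
      set ra := PySem.Int.floordiv r n with hradef
      have hbl := fdiv_bounds n l hn
      have hbr := fdiv_bounds n r hn
      rw [← hladef] at hbl
      rw [← hradef] at hbr
      have hlr : la ≤ ra := fdiv_mono n l r hn hrl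
      set e := min r (la * n + n - 1) with hedef
      have hsplit := PySem.List.pyRange_one_append l (e + 1) (r + 1) (by omega) (by omega)
      rw [hsplit, List.map_append]
      rw [PySem.List.pyRange_one_cons (show la < ra + 1 by omega), List.flatMap_cons]
      have hhead := row_head n l r hn hbl.1
      rw [← hladef, ← hedef] at hhead
      rw [hhead]
      congr 1
      by_cases her : r ≤ la * n + n - 1
      · -- last row reached: both remainders are empty
        have hra : ra = la := by
          rw [hradef, hladef]
          exact fdiv_eq n r la hn (by omega) (by omega)
        have he : e = r := by omega
        rw [he, PySem.List.pyRange_one_eq_nil (le_refl _), hra,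
          PySem.List.pyRange_one_eq_nil (le_refl _)]
        simp
      · rw [not_le] at her
        have he : e = la * n + n - 1 := by omega
        have hfl' : PySem.Int.floordiv (e + 1) n = la + 1 := by
          apply fdiv_eq n (e + 1) (la + 1) hn (by rw [he]; ring_nf; omega) (by rw [he]; ring_nf; omega)
        have hrec := ih n (e + 1) r hn (by omega)
        rw [hfl', ← hradef] at hrec
        rw [hrec]
        have hcong : ∀ a ∈ PySem.List.pyRange (la + 1) (ra + 1) 1,
            pvRow n (e + 1) r a = pvRow n l r a := by
          intro a ha
          rw [PySem.List.mem_pyRange_one] at ha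
          have han : (la + 1) * n ≤ a * n :=
            mul_le_mul_of_nonneg_right (by omega) (by omega)
          have h1 : max (e + 1) (a * n) = a * n := max_eq_right (by nlinarith [han])
          have h2 : max l (a * n) = a * n := max_eq_right (by nlinarith [han, hbl.2])
          unfold pvRow
          rw [h1, h2]
        rw [List.flatMap_def, List.flatMap_def]
        exact congrArg List.flatten (List.map_congr_left hcong)

-- ===== VERDICT (by name: the statement is the Claim_ definition above) =====
theorem solution_spec : Claim_equal_solution := by
  intro n left right _ hpre
  unfold Spec_solution
  rw [solution_eq_map, solution_alt_eq_flatMap]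
  exact main_aux (right + 1 - left).toNat n left right hpre (le_refl _)
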